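-- pv_equiv track=rewrite | github.com/GunjanAS/freeze_tag | base.py | is_prey_in_vicinty
-- ===== SOURCE A (Python) =====
-- def is_prey_in_vicinty(source, destinations, dim_x,dim_y):
--
--     all_moves = [[1, 0],
--                  [0, 1],
--                  [-1, 0],
--                  [0, -1],
--                  [-1, -1],
--                  [-1, 1],
--                  [1, -1],
--                  [1, 1]]
--     for a_move in all_moves:
--         child_x = source[0] + a_move[0]
--         child_y = source[1] + a_move[1]
--         if (child_x > dim_x-1 or child_x < 0 or child_y > dim_y-1 or child_y < 0):
--             continue
--         else:
--             if (child_x, child_y) == destinations: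
--                 return True
--     return False
-- ===== SOURCE B (Python) =====
-- def is_prey_in_vicinty(source, destinations, dim_x, dim_y):
--     dx = destinations[0] - source[0]
--     dy = destinations[1] - source[1]
--     return (max(abs(dx), abs(dy)) == 1
--             and 0 <= destinations[0] <= dim_x - 1
--             and 0 <= destinations[1] <= dim_y - 1)
-- ===== Notes on version B (the rewrite author's own statement) =====
-- stated objective: simpler
-- what changed: Replaced the 8-entry move table and the scanning loop with a closed-form Chebyshev-distance test (max(|dx|,|dy|) == 1) plus the same bounds check on the destination.
import Mathlib
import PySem

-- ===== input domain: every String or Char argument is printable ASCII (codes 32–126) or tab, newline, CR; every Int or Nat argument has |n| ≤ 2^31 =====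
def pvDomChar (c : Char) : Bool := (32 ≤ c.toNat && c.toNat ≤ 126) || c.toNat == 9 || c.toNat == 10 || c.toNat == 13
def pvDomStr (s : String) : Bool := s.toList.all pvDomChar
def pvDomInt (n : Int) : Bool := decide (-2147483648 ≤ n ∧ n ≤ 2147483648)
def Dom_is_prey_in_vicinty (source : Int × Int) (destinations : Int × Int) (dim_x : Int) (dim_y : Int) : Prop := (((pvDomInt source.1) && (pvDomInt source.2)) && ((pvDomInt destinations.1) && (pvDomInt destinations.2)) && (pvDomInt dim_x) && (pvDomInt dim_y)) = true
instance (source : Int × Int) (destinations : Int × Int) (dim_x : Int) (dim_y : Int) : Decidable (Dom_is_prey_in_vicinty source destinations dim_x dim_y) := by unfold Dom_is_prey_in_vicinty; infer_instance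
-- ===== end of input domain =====

-- B replaces the 8-entry move table and loop with a closed-form Chebyshev adjacency + bounds test (simpler).


-- ===== PORT A =====
-- A-side helper: the loop over all_moves, early-returning True on a bounded match
def pvLoopA (source : Int × Int) (destinations : Int × Int) (dim_x : Int) (dim_y : Int) : List (Int × Int) → Bool
  | [] => false
  | a_move :: rest =>
    let child_x := source.1 + a_move.1
    let child_y := source.2 + a_move.2
    if child_x > dim_x - 1 ∨ child_x < 0 ∨ child_y > dim_y - 1 ∨ child_y < 0 then
      pvLoopA source destinations dim_x dim_y rest
    else
      if (child_x, child_y) = destinations then true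
      else pvLoopA source destinations dim_x dim_y rest

def is_prey_in_vicinty (source : Int × Int) (destinations : Int × Int) (dim_x : Int) (dim_y : Int) : Bool :=
  pvLoopA source destinations dim_x dim_y
    [(1, 0), (0, 1), (-1, 0), (0, -1), (-1, -1), (-1, 1), (1, -1), (1, 1)]

-- ===== PORT B =====
def is_prey_in_vicinty_alt (source : Int × Int) (destinations : Int × Int) (dim_x : Int) (dim_y : Int) : Bool :=
  let dx := destinations.1 - source.1
  let dy := destinations.2 - source.2
  decide (max |dx| |dy| = 1 ∧ 0 ≤ destinations.1 ∧ destinations.1 ≤ dim_x - 1 ∧ 0 ≤ destinations.2 ∧ destinations.2 ≤ dim_y - 1)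

-- ===== PRECONDITION & SPEC =====
def Spec_is_prey_in_vicinty (source : Int × Int) (destinations : Int × Int) (dim_x : Int) (dim_y : Int) (out : Bool) : Prop := out = is_prey_in_vicinty_alt source destinations dim_x dim_y
instance (source : Int × Int) (destinations : Int × Int) (dim_x : Int) (dim_y : Int) (out : Bool) : Decidable (Spec_is_prey_in_vicinty source destinations dim_x dim_y out) := by unfold Spec_is_prey_in_vicinty; infer_instance

-- ===== CLAIM (what is proved, stated in full; the proofs are below) =====
def Claim_equal_is_prey_in_vicinty : Prop := ∀ (source : Int × Int) (destinations : Int × Int) (dim_x : Int) (dim_y : Int), Dom_is_prey_in_vicinty source destinations dim_x dim_y → Spec_is_prey_in_vicinty source destinations dim_x dim_y (is_prey_in_vicinty source destinations dim_x dim_y)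

-- ===== LEMMAS AND PROOFS =====

-- ===== VERDICT (by name: the statement is the Claim_ definition above) =====
-- linear-arithmetic form of the Chebyshev adjacency test
theorem pv_cheb (a b : Int) : max |a| |b| = 1 ↔ ((a ≤ 1 ∧ -1 ≤ a ∧ b ≤ 1 ∧ -1 ≤ b) ∧ ¬(a = 0 ∧ b = 0)) := by
  rcases abs_cases a with ⟨h1, h2⟩ | ⟨h1, h2⟩ <;>
    rcases abs_cases b with ⟨h3, h4⟩ | ⟨h3, h4⟩ <;>
      simp only [max_def] <;> split_ifs <;> omega

-- pvLoopA returns true iff some move yields an in-bounds child equal to destinations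
theorem pv_loop_iff (s d : Int × Int) (X Y : Int) (ms : List (Int × Int)) :
    pvLoopA s d X Y ms = true ↔
      ∃ m ∈ ms, ¬(s.1 + m.1 > X - 1 ∨ s.1 + m.1 < 0 ∨ s.2 + m.2 > Y - 1 ∨ s.2 + m.2 < 0) ∧
        (s.1 + m.1, s.2 + m.2) = d := by
  induction ms with
  | nil => simp [pvLoopA]
  | cons m ms ih =>
    simp only [pvLoopA, List.exists_mem_cons_iff]
    split_ifs with h1 h2 <;> simp_all

set_option maxHeartbeats 1000000 in
theorem is_prey_in_vicinty_spec : Claim_equal_is_prey_in_vicinty := by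
  intro ⟨sx, sy⟩ ⟨tx, ty⟩ dim_x dim_y _
  unfold Spec_is_prey_in_vicinty
  rw [Bool.eq_iff_iff]
  simp only [is_prey_in_vicinty, is_prey_in_vicinty_alt, pv_loop_iff,
    List.exists_mem_cons_iff, List.not_mem_nil, false_and, exists_false, or_false,
    Prod.mk.injEq, decide_eq_true_eq, pv_cheb]
  constructor
  · omega
  · rintro ⟨⟨⟨hdx1, hdx2, hdy1, hdy2⟩, hne⟩, hb1, hb2, hb3, hb4⟩
    have hx : tx = sx - 1 ∨ tx = sx ∨ tx = sx + 1 := by omega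
    have hy : ty = sy - 1 ∨ ty = sy ∨ ty = sy + 1 := by omega
    rcases hx with hx | hx | hx <;> rcases hy with hy | hy | hy
    · exact .inr (.inr (.inr (.inr (.inl (by omega)))))
    · exact .inr (.inr (.inl (by omega)))
    · exact .inr (.inr (.inr (.inr (.inr (.inl (by omega))))))
    · exact .inr (.inr (.inr (.inl (by omega))))
    · exact absurd ⟨by omega, by omega⟩ hne
    · exact .inr (.inl (by omega))
    · exact .inr (.inr (.inr (.inr (.inr (.inr (.inl (by omega)))))))
    · exact .inl (by omega)
    · exact .inr (.inr (.inr (.inr (.inr (.inr (.inr (by omega)))))))
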